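-- pv_equiv track=rewrite | github.com/james5635/GeekForGeek-Data-Structure-and-Algorithm | sorting/hard/min_subsets_consecutive/solution.py | min_subsets_consecutive_detailed
-- ===== SOURCE A (Python) =====
-- def min_subsets_consecutive_detailed(arr):
--     """
--     Return both count and the actual subsets.
--
--     Args:
--         arr: Input array
--
--     Returns:
--         tuple: (count, list of subsets)
--     """
--     if not arr:
--         return 0, []
--
--     arr.sort()
--     subsets = []
--     current_subset = [arr[0]]
--
--     for i in range(1, len(arr)):
--         if arr[i] == arr[i - 1] + 1:
--             current_subset.append(arr[i])
--         else:
--             subsets.append(current_subset)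
--             current_subset = [arr[i]]
--
--     subsets.append(current_subset)
--     return len(subsets), subsets
-- ===== SOURCE B (Python) =====
-- def min_subsets_consecutive_detailed(arr):
--     """
--     Return both count and the actual subsets.
--     Two-phase version: first compute the run lengths of consecutive
--     (+1) runs in the sorted array, then carve the array into groups
--     of those lengths.  (Sorts arr in place, like the original.)
--     """
--     if not arr:
--         return 0, []
--
--     arr.sort()
--
--     # phase 1: lengths of the maximal consecutive runs
--     lens = []
--     run = 1
--     for x, y in zip(arr, arr[1:]):
--         if y == x + 1:
--             run += 1
--         else:
--             lens.append(run)
--             run = 1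
--     lens.append(run)
--
--     # phase 2: carve the sorted array into groups of those lengths
--     it = iter(arr)
--     subsets = [[next(it) for _ in range(length)] for length in lens]
--     return len(lens), subsets
-- ===== Notes on version B (the rewrite author's own statement) =====
-- stated objective: alternative
-- what changed: Instead of A's single pass that accumulates the current subset and flushes it into the result at each break, B makes two phases: a first pass over zip(arr, arr[1:]) records only the run LENGTHS, and a second pass carves the sorted array into groups of those lengths; the count is len(lens), never materialised as len(subsets).
import Mathlib
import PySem

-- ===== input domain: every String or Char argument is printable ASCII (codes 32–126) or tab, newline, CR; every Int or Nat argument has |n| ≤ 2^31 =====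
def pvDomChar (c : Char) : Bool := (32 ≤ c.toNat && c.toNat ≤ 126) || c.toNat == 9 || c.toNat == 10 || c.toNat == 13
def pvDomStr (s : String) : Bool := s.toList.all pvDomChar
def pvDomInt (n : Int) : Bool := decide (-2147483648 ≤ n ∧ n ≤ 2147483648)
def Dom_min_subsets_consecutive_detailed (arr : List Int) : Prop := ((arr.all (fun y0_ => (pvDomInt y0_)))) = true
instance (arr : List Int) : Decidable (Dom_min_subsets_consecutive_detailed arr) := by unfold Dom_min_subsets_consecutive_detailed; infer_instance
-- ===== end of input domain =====

-- B replaces A's single accumulate-and-flush pass by two phases (run lengths over zip(arr, arr[1:]),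
-- then carving the sorted array into groups of those lengths); equal return value proved (both sort arr in place).


-- ===== PORT A =====
-- A's for-loop over i = 1..len-1, comparing arr[i] with arr[i-1], as the obvious structural
-- recursion over the tail of the sorted list carrying prev = arr[i-1], current_subset and subsets.
def loopA : List Int → Int → List Int → List (List Int) → List (List Int)
  | [], _, cur, subsets => subsets ++ [cur]
  | x :: xs, prev, cur, subsets =>
      if x = prev + 1 then loopA xs x (cur ++ [x]) subsets
      else loopA xs x [x] (subsets ++ [cur])

def min_subsets_consecutive_detailed (arr : List Int) : Int × List (List Int) :=
  if arr = [] then (0, [])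
  else
    match PySem.List.sorted arr (fun x => x) false with
    | [] => (0, [])   -- unreachable (sorted of a nonempty list is nonempty); totality guard
    | a :: rest =>
      let subsets := loopA rest a [a] []
      ((subsets.length : Int), subsets)

-- ===== PORT B =====
-- phase 1 of Source B: the loop over zip(arr, arr[1:]) carrying (lens, run); the trailing
-- 'lens.append(run)' is the base case.
def lensLoop : List (Int × Int) → List Nat → Nat → List Nat
  | [], lens, run => lens ++ [run]
  | (x, y) :: ps, lens, run =>
      if y = x + 1 then lensLoop ps lens (run + 1)
      else lensLoop ps (lens ++ [run]) 1

-- phase 2 of Source B: consuming 'length' elements from the iterator for each length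
-- ([[next(it) for _ in range(length)] for length in lens]); exact — the iterator position is 'rest'.
def carve : List Nat → List Int → List (List Int)
  | [], _ => []
  | L :: Ls, s => s.take L :: carve Ls (s.drop L)

def min_subsets_consecutive_detailed_alt (arr : List Int) : Int × List (List Int) :=
  if arr = [] then (0, [])
  else
    let s := PySem.List.sorted arr (fun x => x) false
    let lens := lensLoop (s.zip s.tail) [] 1
    ((lens.length : Int), carve lens s)

-- ===== PRECONDITION & SPEC =====
def Spec_min_subsets_consecutive_detailed (arr : List Int) (out : Int × List (List Int)) : Prop := out = min_subsets_consecutive_detailed_alt arr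
instance (arr : List Int) (out : Int × List (List Int)) : Decidable (Spec_min_subsets_consecutive_detailed arr out) := by unfold Spec_min_subsets_consecutive_detailed; infer_instance

-- ===== CLAIM (what is proved, stated in full; the proofs are below) =====
def Claim_equal_min_subsets_consecutive_detailed : Prop := ∀ (arr : List Int), Dom_min_subsets_consecutive_detailed arr → Spec_min_subsets_consecutive_detailed arr (min_subsets_consecutive_detailed arr)

-- ===== LEMMAS AND PROOFS =====

-- the lens accumulator is pure output
theorem lensLoop_acc (ps : List (Int × Int)) (acc : List Nat) (r : Nat) :
    lensLoop ps acc r = acc ++ lensLoop ps [] r := by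
  induction ps generalizing acc r with
  | nil => rfl
  | cons p ps ih =>
      obtain ⟨x, y⟩ := p
      by_cases h : y = x + 1
      · simp only [lensLoop, if_pos h]
        exact ih acc (r + 1)
      · simp only [lensLoop, if_neg h, List.nil_append]
        rw [ih (acc ++ [r]), ih [r]]
        simp

theorem carve_length (Ls : List Nat) (s : List Int) : (carve Ls s).length = Ls.length := by
  induction Ls generalizing s with
  | nil => rfl
  | cons L Ls ih => simp [carve, ih]

-- main invariant: A's loop over xs with state (prev, cur, subsets) produces exactly the
-- carving of cur ++ xs by the run lengths B computes over the remaining pairs, seeded with run = |cur|.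
theorem loopA_eq_carve (xs : List Int) (prev : Int) (cur : List Int) (subsets : List (List Int)) :
    loopA xs prev cur subsets
      = subsets ++ carve (lensLoop ((prev :: xs).zip xs) [] cur.length) (cur ++ xs) := by
  induction xs generalizing prev cur subsets with
  | nil => simp [loopA, lensLoop, carve]
  | cons x xs ih =>
      by_cases h : x = prev + 1
      · simp only [loopA, if_pos h, List.zip_cons_cons, lensLoop]
        rw [ih x (cur ++ [x]) subsets]
        simp
      · simp only [loopA, if_neg h, List.zip_cons_cons, lensLoop]
        rw [ih x [x] (subsets ++ [cur]), List.nil_append,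
            lensLoop_acc ((x :: xs).zip xs) [cur.length] 1]
        simp only [List.singleton_append, carve, List.take_left, List.drop_left,
          List.length_cons, List.length_nil]
        simp

-- ===== VERDICT (by name: the statement is the Claim_ definition above) =====
theorem min_subsets_consecutive_detailed_spec : Claim_equal_min_subsets_consecutive_detailed := by
  intro arr _
  unfold Spec_min_subsets_consecutive_detailed
  unfold min_subsets_consecutive_detailed min_subsets_consecutive_detailed_alt
  by_cases harr : arr = []
  · simp [harr]
  · simp only [if_neg harr]
    rcases hs : PySem.List.sorted arr (fun x => x) false with _ | ⟨a, rest⟩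
    · rw [PySem.List.sorted_eq_nil_iff] at hs
      exact absurd hs harr
    · simp only [List.tail_cons]
      rw [loopA_eq_carve rest a [a] []]
      simp [carve_length]
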